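-- pv_equiv track=rewrite | github.com/akamy-rent/akamy-rent | py-compile-server/test_server.py | write_tenent_portion
-- ===== SOURCE A (Python) =====
-- def write_tenent_portion(tenants):
--     tenent_num = 1
--     tenent_portion = ""
--     current_tenent_portion = tenent_portion
--     for tenent in tenants:
--         tenent = write_single_tenent_function(tenent_num)
--         current_tenent_portion+=tenent
--
--     return current_tenent_portion
--
-- def write_single_tenent_function(num):
--     tenent_func = f'''
--     withdraw{num}()
--     {{
--         require(now + 3 seconds);
--         msg.address{num}.transfer.address(this);
--         collect();
--     }}\n
--     '''
--     return tenent_func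
-- ===== SOURCE B (Python) =====
-- def write_tenent_portion(tenants):
--     single = write_single_tenent_function(1)
--     count = sum(1 for _ in tenants)
--     return single * count
--
-- def write_single_tenent_function(num):
--     tenent_func = f'''
--     withdraw{num}()
--     {{
--         require(now + 3 seconds);
--         msg.address{num}.transfer.address(this);
--         collect();
--     }}\n
--     '''
--     return tenent_func
-- ===== Notes on version B (the rewrite author's own statement) =====
-- stated objective: simpler
-- what changed: B computes the single tenant string once and returns it repeated count times (count obtained by consuming the iterable), replacing A's accumulating concatenation loop with a single string multiplication.
import Mathlib
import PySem

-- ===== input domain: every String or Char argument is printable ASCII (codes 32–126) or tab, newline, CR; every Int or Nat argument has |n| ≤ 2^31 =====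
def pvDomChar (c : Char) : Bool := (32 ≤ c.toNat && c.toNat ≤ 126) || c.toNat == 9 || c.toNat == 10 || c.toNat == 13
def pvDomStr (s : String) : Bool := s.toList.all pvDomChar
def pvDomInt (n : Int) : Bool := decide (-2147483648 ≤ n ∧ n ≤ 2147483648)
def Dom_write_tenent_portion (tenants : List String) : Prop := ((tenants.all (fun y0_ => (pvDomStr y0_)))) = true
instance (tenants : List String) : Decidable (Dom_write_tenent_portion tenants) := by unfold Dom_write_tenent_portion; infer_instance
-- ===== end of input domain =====

-- B computes the single tenant string once and returns it repeated count times
-- (count obtained by consuming the iterable), instead of A's accumulating loop.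

-- ===== PORT A =====
def write_single_tenent_function (num : Int) : String :=
  "\n    withdraw" ++ PySem.Int.toStr num ++ "()\n    { \n        require(now + 3 seconds); \n        msg.address" ++ PySem.Int.toStr num ++ ".transfer.address(this);\n        collect();\n    }\n\n    "

def write_tenent_portion (tenants : List String) : String :=
  -- tenent_num stays 1 throughout the loop; each iteration rebinds tenent and appends
  tenants.foldl (fun current_tenent_portion _tenent =>
    current_tenent_portion ++ write_single_tenent_function 1) ""

-- ===== PORT B =====
-- (B uses the same module helper write_single_tenent_function, called once)
def write_tenent_portion_alt (tenants : List String) : String :=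
  let single := write_single_tenent_function 1
  let count := tenants.foldl (fun n _ => n + 1) 0  -- sum(1 for _ in tenants)
  String.join (List.replicate count single)        -- single * count

-- ===== PRECONDITION & SPEC =====
def Spec_write_tenent_portion (tenants : List String) (out : String) : Prop := out = write_tenent_portion_alt tenants
instance (tenants : List String) (out : String) : Decidable (Spec_write_tenent_portion tenants out) := by unfold Spec_write_tenent_portion; infer_instance

-- ===== CLAIM (what is proved, stated in full; the proofs are below) =====
def Claim_equal_write_tenent_portion : Prop := ∀ (tenants : List String), Dom_write_tenent_portion tenants → Spec_write_tenent_portion tenants (write_tenent_portion tenants)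

-- ===== LEMMAS AND PROOFS =====
theorem count_foldl_eq_length (tenants : List String) :
    tenants.foldl (fun n _ => n + 1) 0 = tenants.length := by
  suffices h : ∀ (l : List String) (n : Nat), l.foldl (fun n _ => n + 1) n = n + l.length by
    simpa using h tenants 0
  intro l
  induction l with
  | nil => simp
  | cons x xs ih => intro n; simp [List.foldl, ih]; omega

theorem foldl_append_shift (l : List String) : ∀ a b : String, l.foldl (· ++ ·) (a ++ b) = a ++ l.foldl (· ++ ·) b := by
  induction l with
  | nil => intro a b; rfl
  | cons x xs ih => intro a b; simp only [List.foldl_cons, String.append_assoc, ih]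

theorem join_foldl (l : List String) (acc : String) :
    l.foldl (fun r s => r ++ s) acc = acc ++ String.join l := by
  rw [String.join, show acc = acc ++ "" by simp, foldl_append_shift]
  simp

theorem join_cons (x : String) (l : List String) : String.join (x :: l) = x ++ String.join l := by
  rw [String.join, List.foldl_cons]
  simpa using join_foldl l ("" ++ x)

theorem foldl_append_const (s : String) (l : List String) (acc : String) :
    l.foldl (fun a _ => a ++ s) acc = acc ++ String.join (List.replicate l.length s) := by
  induction l generalizing acc with
  | nil => simp [String.join]
  | cons x xs ih =>
      simp [List.foldl, ih, List.replicate_succ, join_cons, String.append_assoc]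

-- ===== VERDICT (by name: the statement is the Claim_ definition above) =====
theorem write_tenent_portion_spec : Claim_equal_write_tenent_portion := by
  intro tenants _
  unfold Spec_write_tenent_portion write_tenent_portion write_tenent_portion_alt
  simp only [foldl_append_const, count_foldl_eq_length, write_single_tenent_function]
  simp
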